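-- pv_equiv track=rewrite | github.com/kondanta/study-lib | Unal/Network and Crypto/DES-like Project/main.py | compliment
-- ===== SOURCE A (Python) =====
-- def compliment(key):
--     complimented = ''
--     for item in key:
--         if item == '1':
--             complimented += '0'
--         elif item == '0':
--             complimented += '1'
--     return [complimented[i:i+8] for i in range(0, len(complimented), 8)]
-- ===== SOURCE B (Python) =====
-- def compliment(key):
--     result = []
--     buf = ''
--     for item in key:
--         if item == '1':
--             buf += '0'
--         elif item == '0':
--             buf += '1'
--         else:
--             continue
--         if len(buf) == 8:
--             result.append(buf)
--             buf = ''
--     if buf: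
--         result.append(buf)
--     return result
-- ===== Notes on version B (the rewrite author's own statement) =====
-- stated objective: alternative
-- what changed: Fuses complementing and chunking into one pass that grows an 8-char buffer and emits each chunk as soon as it is full, instead of building the whole complemented string and then slicing it every 8 characters.
import Mathlib
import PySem

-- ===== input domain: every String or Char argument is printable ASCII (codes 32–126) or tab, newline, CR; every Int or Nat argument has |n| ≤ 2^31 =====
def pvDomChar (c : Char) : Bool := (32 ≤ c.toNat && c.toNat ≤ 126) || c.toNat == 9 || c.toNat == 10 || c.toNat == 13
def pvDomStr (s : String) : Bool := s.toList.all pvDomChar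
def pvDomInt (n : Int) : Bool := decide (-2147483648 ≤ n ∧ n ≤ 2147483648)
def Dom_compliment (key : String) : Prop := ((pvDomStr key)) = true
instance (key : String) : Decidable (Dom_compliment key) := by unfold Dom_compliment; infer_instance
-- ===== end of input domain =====

-- B fuses complementing and chunking into one pass with an 8-char buffer (alternative decomposition, same cost).

-- ===== PORT A =====
def compliment (key : String) : List String :=
  let complimented : List Char :=
    key.toList.foldl (fun acc item =>
      if item = '1' then acc ++ ['0']
      else if item = '0' then acc ++ ['1']
      else acc) []
  (PySem.List.pyRange 0 (complimented.length : Int) 8).map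
    (fun i => String.ofList (PySem.List.slice complimented (some i) (some (i + 8))))

-- ===== PORT B =====
-- the body of B's loop after a bit b has been chosen (append to buffer, flush at 8)
def flushStep (st : List String × List Char) (b : Char) : List String × List Char :=
  let buf := st.2 ++ [b]
  if buf.length = 8 then (st.1 ++ [String.ofList buf], []) else (st.1, buf)

def compliment_alt (key : String) : List String :=
  let st := key.toList.foldl (fun st item =>
    if item = '1' then flushStep st '0'
    else if item = '0' then flushStep st '1'
    else st) (([], []) : List String × List Char)
  if st.2 = [] then st.1 else st.1 ++ [String.ofList st.2]

-- ===== PRECONDITION & SPEC =====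
def Spec_compliment (key : String) (out : List String) : Prop := out = compliment_alt key
instance (key : String) (out : List String) : Decidable (Spec_compliment key out) := by unfold Spec_compliment; infer_instance

-- ===== CLAIM (what is proved, stated in full; the proofs are below) =====
def Claim_equal_compliment : Prop := ∀ (key : String), Dom_compliment key → Spec_compliment key (compliment key)

-- ===== LEMMAS AND PROOFS =====

-- the complement of one character, as an Option
def compBit (c : Char) : Option Char :=
  if c = '1' then some '0' else if c = '0' then some '1' else none

-- reference chunking: take 8 characters at a time
def chunk8 : List Char → List String
  | [] => []
  | x :: t => String.ofList ((x :: t).take 8) :: chunk8 (t.drop 7)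
  termination_by l => l.length
  decreasing_by simp [List.length_drop]

theorem chunk8_nil : chunk8 [] = [] := by rw [chunk8.eq_def]

theorem chunk8_cons (x : Char) (t : List Char) :
    chunk8 (x :: t) = String.ofList ((x :: t).take 8) :: chunk8 ((x :: t).drop 8) := by
  rw [chunk8.eq_def]
  simp

theorem chunk8_short (l : List Char) (h0 : l ≠ []) (h8 : l.length ≤ 8) :
    chunk8 l = [String.ofList l] := by
  cases l with
  | nil => exact absurd rfl h0
  | cons b bs =>
    rw [chunk8_cons, List.take_of_length_le h8, List.drop_eq_nil_of_le h8, chunk8_nil]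

theorem chunk8_full (c8 t : List Char) (h : c8.length = 8) :
    chunk8 (c8 ++ t) = String.ofList c8 :: chunk8 t := by
  cases c8 with
  | nil => simp at h
  | cons y ys =>
    rw [List.cons_append, chunk8_cons, ← List.cons_append,
      List.take_left' h, List.drop_left' h]

-- A's fold builds the filterMap of compBit
theorem aFold_eq_filterMap (l : List Char) (acc : List Char) :
    l.foldl (fun acc item =>
      if item = '1' then acc ++ ['0']
      else if item = '0' then acc ++ ['1']
      else acc) acc = acc ++ l.filterMap compBit := by
  induction l generalizing acc with
  | nil => simp
  | cons x t ih =>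
    simp only [List.foldl_cons, List.filterMap_cons]
    by_cases h1 : x = '1'
    · simp [h1, compBit, ih]
    · by_cases h0 : x = '0' <;> simp [h1, h0, compBit, ih]

-- one slice of A's comprehension as drop/take
theorem sliceF_eq (cl : List Char) (k : ℕ) :
    PySem.List.slice cl (some (0 + 8 * (k : ℤ))) (some (0 + 8 * (k : ℤ) + 8)) =
      (cl.drop (8 * k)).take 8 := by
  have h := PySem.List.slice_natCast_add cl (8 * k) 8
  convert h using 3 <;> push_cast <;> ring

-- A's range/slice comprehension in canonical nat form
theorem aMap_eq (cl : List Char) :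
    (PySem.List.pyRange 0 (cl.length : Int) 8).map
      (fun i => String.ofList (PySem.List.slice cl (some i) (some (i + 8))))
      = (List.range ((cl.length + 7) / 8)).map
          (fun k => String.ofList ((cl.drop (8 * k)).take 8)) := by
  rw [PySem.List.pyRange_of_pos 0 (cl.length : Int) (by norm_num)]
  have hcnt : (if (0 : ℤ) < (cl.length : ℤ) then (((cl.length : ℤ) - 0 + 8 - 1) / 8).toNat else 0)
      = (cl.length + 7) / 8 := by
    split_ifs with h <;> omega
  rw [hcnt, List.map_map]
  apply List.map_congr_left
  intro k _
  simp only [Function.comp]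
  rw [sliceF_eq]

-- the canonical nat form is chunk8
theorem rangeMap_eq_chunk8 (n : ℕ) : ∀ (cl : List Char), cl.length = n →
    (List.range ((n + 7) / 8)).map
      (fun k => String.ofList ((cl.drop (8 * k)).take 8)) = chunk8 cl := by
  induction n using Nat.strong_induction_on with
  | _ n ih =>
    intro cl hn
    cases cl with
    | nil =>
      obtain rfl : n = 0 := by simpa using hn.symm
      simp [chunk8_nil]
    | cons x t =>
      have hpos : 0 < n := by simp at hn; omega
      have hsplit : (n + 7) / 8 = ((n - 8 + 7) / 8) + 1 := by omega
      rw [hsplit, List.range_succ_eq_map, List.map_cons, List.map_map]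
      have hn' : t.length + 1 = n := by simpa using hn
      have hdl : ((x :: t).drop 8).length = n - 8 := by
        simp [List.length_drop]; omega
      have htail : (List.range ((n - 8 + 7) / 8)).map
          ((fun k => String.ofList (((x :: t).drop (8 * k)).take 8)) ∘ Nat.succ)
          = chunk8 ((x :: t).drop 8) := by
        rw [← ih (n - 8) (by omega) ((x :: t).drop 8) hdl]
        apply List.map_congr_left
        intro k _
        simp only [Function.comp, Nat.succ_eq_add_one]
        rw [List.drop_drop, show 8 * (k + 1) = 8 + 8 * k by ring]
      rw [htail, chunk8_cons]
      simp

-- finalize = B's post-loop flush of the partial buffer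
def finalize (st : List String × List Char) : List String :=
  if st.2 = [] then st.1 else st.1 ++ [String.ofList st.2]

-- B's fold over the raw characters equals flushStep folded over the complemented bits
theorem bFold_eq (l : List Char) (st : List String × List Char) :
    l.foldl (fun st item =>
      if item = '1' then flushStep st '0'
      else if item = '0' then flushStep st '1'
      else st) st = (l.filterMap compBit).foldl flushStep st := by
  induction l generalizing st with
  | nil => rfl
  | cons x t ih =>
    simp only [List.foldl_cons, List.filterMap_cons]
    by_cases h1 : x = '1'
    · simp [h1, compBit, ih]
    · by_cases h0 : x = '0' <;> simp [h1, h0, compBit, ih]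

-- the buffer invariant: flushing a fold of flushStep yields acc ++ chunk8 (buf ++ l)
theorem flushFold_eq (l : List Char) (acc : List String) (buf : List Char)
    (hbuf : buf.length < 8) :
    finalize (l.foldl flushStep (acc, buf)) = acc ++ chunk8 (buf ++ l) := by
  induction l generalizing acc buf with
  | nil =>
    cases hb : buf with
    | nil => simp [finalize, chunk8_nil]
    | cons b bs =>
      subst hb
      rw [List.append_nil, chunk8_short _ (by simp) (by omega)]
      simp [finalize]
  | cons x t ih =>
    simp only [List.foldl_cons]
    by_cases h8 : (buf ++ [x]).length = 8
    · have hstep : flushStep (acc, buf) x = (acc ++ [String.ofList (buf ++ [x])], []) := by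
        simp only [flushStep]
        rw [if_pos h8]
      rw [hstep, ih _ _ (by norm_num), show buf ++ x :: t = (buf ++ [x]) ++ t by simp,
        chunk8_full _ _ h8]
      simp
    · have hstep : flushStep (acc, buf) x = (acc, buf ++ [x]) := by
        simp only [flushStep]
        rw [if_neg h8]
      have hlt : (buf ++ [x]).length < 8 := by
        simp at h8 ⊢; omega
      rw [hstep, ih _ _ hlt]
      simp

-- ===== VERDICT (by name: the statement is the Claim_ definition above) =====
theorem compliment_spec : Claim_equal_compliment := by
  intro key _
  unfold Spec_compliment compliment compliment_alt
  simp only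
  rw [aFold_eq_filterMap, List.nil_append, aMap_eq,
    rangeMap_eq_chunk8 _ _ rfl, bFold_eq]
  have := flushFold_eq (key.toList.filterMap compBit) [] [] (by norm_num)
  simpa [finalize] using this.symm
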